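-- pv_equiv track=rewrite | github.com/Mag1cTao/- | schedule_statistics_demo.py | find_free_students
-- ===== SOURCE A (Python) =====
-- def find_free_students(students, weekdays, max_class):
--     # 生成全量时间段
--     all_periods = {(day, c) for day in weekdays for c in range(1, max_class+1)}
--
--     # 构建结果字典
--     result = {period: [] for period in sorted(all_periods, key=lambda x: (weekdays.index(x[0]), x[1]))}
--
--     # 遍历所有时间段
--     for period in result.keys():
--         current_day, current_class = period
--         # 检查每个学生
--         for name, schedule in students.items():
--             # 该学生当天是否有课
--             if current_day not in schedule:
--                 result[period].append(name)
--                 continue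
--             # 当前节次是否空闲
--             if current_class not in schedule[current_day]:
--                 result[period].append(name)
--     return result
-- ===== SOURCE B (Python) =====
-- def find_free_students(students, weekdays, max_class):
--     # Subtraction/scatter: start every period with all students, then walk only
--     # the busy slots of each student's schedule and remove the student there.
--     all_periods = {(day, c) for day in weekdays for c in range(1, max_class + 1)}
--     result = {period: list(students)
--               for period in sorted(all_periods, key=lambda x: (weekdays.index(x[0]), x[1]))}
--     for name, schedule in students.items():
--         for day, classes in schedule.items():
--             for c in classes:
--                 lst = result.get((day, c))
--                 if lst is not None and name in lst:
--                     lst.remove(name)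
--     return result
-- ===== Notes on version B (the rewrite author's own statement) =====
-- stated objective: alternative
-- what changed: B starts every period with the full student list and subtracts students by scattering over only the busy (day, class) slots of each schedule, instead of A's testing of every student (with a day-membership and class-membership scan) against every period.
import Mathlib
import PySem

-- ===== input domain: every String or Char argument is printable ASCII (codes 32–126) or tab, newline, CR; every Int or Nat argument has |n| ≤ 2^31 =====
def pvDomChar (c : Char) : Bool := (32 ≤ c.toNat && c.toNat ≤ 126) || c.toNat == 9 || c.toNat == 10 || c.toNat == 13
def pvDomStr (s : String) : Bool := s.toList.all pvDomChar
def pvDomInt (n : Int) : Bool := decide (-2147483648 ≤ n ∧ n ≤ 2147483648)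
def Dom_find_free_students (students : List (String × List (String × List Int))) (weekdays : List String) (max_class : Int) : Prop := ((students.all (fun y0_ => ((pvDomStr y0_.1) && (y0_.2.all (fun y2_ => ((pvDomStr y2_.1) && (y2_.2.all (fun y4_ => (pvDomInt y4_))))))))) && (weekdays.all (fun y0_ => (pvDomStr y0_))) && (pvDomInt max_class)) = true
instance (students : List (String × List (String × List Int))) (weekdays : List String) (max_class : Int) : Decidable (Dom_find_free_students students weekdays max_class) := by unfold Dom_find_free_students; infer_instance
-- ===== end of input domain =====

-- B computes the free-student lists by subtraction: every period starts with all students and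
-- each student is removed from exactly their busy slots (alternative decomposition, same cost class).

-- ===== PORT A =====
def find_free_students (students : List (String × List (String × List Int))) (weekdays : List String) (max_class : Int) : List (String × Int × List String) :=
  -- all_periods = {(day, c) for day in weekdays for c in range(1, max_class+1)}  (a set)
  let all_periods : List (String × Int) :=
    PySem.Set.ofList (weekdays.flatMap (fun day =>
      (PySem.List.pyRange 1 (max_class + 1) 1).map (fun c => (day, c))))
  -- sorted(all_periods, key=lambda x: (weekdays.index(x[0]), x[1])); index never raises (day ∈ weekdays)
  let periods : List (String × Int) :=
    PySem.List.sorted2 all_periods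
      (fun x => (((PySem.List.index? weekdays x.1).getD 0 : Nat) : Int))
      (fun x => x.2)
  -- result = {period: [] …}; keys are distinct, so the per-period appends build each list in key order
  periods.map (fun period =>
    (period.1, period.2,
      students.foldl (fun acc st =>
        if ((st.2.map Prod.fst).contains period.1) = false then acc ++ [st.1]
        else if (((List.lookup period.1 st.2).getD []).contains period.2) = false then acc ++ [st.1]
        else acc) []))

-- ===== PORT B =====
def find_free_students_alt (students : List (String × List (String × List Int))) (weekdays : List String) (max_class : Int) : List (String × Int × List String) :=
  let periods : List (String × Int) :=
    PySem.List.sorted2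
      (PySem.Set.ofList (weekdays.flatMap (fun day =>
        (PySem.List.pyRange 1 (max_class + 1) 1).map (fun c => (day, c)))))
      (fun x => (((PySem.List.index? weekdays x.1).getD 0 : Nat) : Int))
      (fun x => x.2)
  -- result = {period: list(students) …}
  let init : List ((String × Int) × List String) :=
    periods.map (fun p => (p, students.map Prod.fst))
  -- scatter over busy slots; the keys are distinct, so result.get((day,c))/lst.remove touches the one entry
  let final : List ((String × Int) × List String) :=
    students.foldl (fun res st =>
      st.2.foldl (fun res de =>
        de.2.foldl (fun res c =>
          res.map (fun e =>
            if e.1 = (de.1, c) ∧ st.1 ∈ e.2 then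
              (e.1, (PySem.List.remove? e.2 st.1).getD e.2)
            else e)) res) res) init
  final.map (fun e => (e.1.1, e.1.2, e.2))

-- ===== PRECONDITION & SPEC =====
-- Pre_ excludes association lists with duplicate dict keys (duplicate student names, or duplicate
-- days inside one schedule): those do not represent Python dicts, and first-match lookup vs
-- full traversal makes any behaviour there accidental.
def Pre_find_free_students (students : List (String × List (String × List Int))) (weekdays : List String) (max_class : Int) : Prop :=
  (students.map Prod.fst).Nodup ∧ ∀ st ∈ students, (st.2.map Prod.fst).Nodup
instance (students : List (String × List (String × List Int))) (weekdays : List String) (max_class : Int) : Decidable (Pre_find_free_students students weekdays max_class) := by unfold Pre_find_free_students; infer_instance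

def pvWitness_find_free_students : (List (String × List (String × List Int))) × List String × Int :=
  ([("ann", [("Mon", [1])]), ("bob", [])], ["Mon", "Tue"], 2)

def Spec_find_free_students (students : List (String × List (String × List Int))) (weekdays : List String) (max_class : Int) (out : List (String × Int × List String)) : Prop := out = find_free_students_alt students weekdays max_class
instance (students : List (String × List (String × List Int))) (weekdays : List String) (max_class : Int) (out : List (String × Int × List String)) : Decidable (Spec_find_free_students students weekdays max_class out) := by unfold Spec_find_free_students; infer_instance

-- ===== CLAIM (what is proved, stated in full; the proofs are below) =====
def Claim_equal_find_free_students : Prop := ∀ (students : List (String × List (String × List Int))) (weekdays : List String) (max_class : Int), Dom_find_free_students students weekdays max_class → Pre_find_free_students students weekdays max_class → Spec_find_free_students students weekdays max_class (find_free_students students weekdays max_class)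


-- ===== LEMMAS AND PROOFS =====

-- busy slot test, as A reads it (first-match lookup)
def pvBusy (st : String × List (String × List Int)) (p : String × Int) : Bool :=
  decide (p.1 ∈ st.2.map Prod.fst ∧ p.2 ∈ (List.lookup p.1 st.2).getD [])

-- B's per-entry update simplifies to an unconditional erase on the matching key
theorem pv_stepC_eq (day : String) (c : Int) (name : String) (e : (String × Int) × List String) :
    (if e.1 = (day, c) ∧ name ∈ e.2 then (e.1, (PySem.List.remove? e.2 name).getD e.2) else e)
      = (e.1, if e.1 = (day, c) then e.2.erase name else e.2) := by
  by_cases h1 : e.1 = (day, c)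
  · by_cases h2 : name ∈ e.2
    · simp [h1, h2, PySem.List.remove?_eq_some_erase e.2 name h2]
    · simp only [h1, h2, and_false, if_pos, List.erase_of_not_mem h2]
      exact Prod.ext h1 rfl
  · simp [h1]

-- a fold whose step is a map over the accumulator is a map of pointwise folds
theorem pv_foldl_map {gamma beta : Type} (l : List gamma) (g : gamma -> beta -> beta) (init : List beta) :
    l.foldl (fun res x => res.map (g x)) init = init.map (fun e => l.foldl (fun e x => g x e) e) := by
  induction l generalizing init with
  | nil => simp
  | cons x t ih => simp [List.foldl_cons, ih, List.map_map, Function.comp_def]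

-- the class-level fold of B keeps the key fixed and acts on the name list
theorem pv_fst2 (classes : List Int) (day : String) (name : String) (p : String × Int) (l : List String) :
    classes.foldl (fun e c => (e.1, if e.1 = (day, c) then e.2.erase name else e.2)) (p, l)
      = (p, classes.foldl (fun l c => if p = (day, c) then l.erase name else l) l) := by
  induction classes generalizing l with
  | nil => rfl
  | cons c t ih => simp [List.foldl_cons, ih]

-- the schedule-level fold of B keeps the key fixed and acts on the name list
theorem pv_fst3 (sched : List (String × List Int)) (name : String) (p : String × Int) (l : List String) :
    sched.foldl (fun e de => de.2.foldl (fun e c => (e.1, if e.1 = (de.1, c) then e.2.erase name else e.2)) e) (p, l)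
      = (p, sched.foldl (fun l de => de.2.foldl (fun l c => if p = (de.1, c) then l.erase name else l) l) l) := by
  induction sched generalizing l with
  | nil => rfl
  | cons de t ih => simp [List.foldl_cons, pv_fst2, ih]

-- B's whole pass keeps the key fixed and acts on the name list
theorem pv_B_fold (sts : List (String × List (String × List Int))) (p : String × Int) (l : List String) :
    sts.foldl (fun e st =>
        st.2.foldl (fun e de =>
          de.2.foldl (fun e c => (e.1, if e.1 = (de.1, c) then e.2.erase st.1 else e.2)) e) e) (p, l)
      = (p, sts.foldl (fun l st =>
          st.2.foldl (fun l de =>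
            de.2.foldl (fun l c => if p = (de.1, c) then l.erase st.1 else l) l) l) l) := by
  induction sts generalizing l with
  | nil => rfl
  | cons st t ih => simp [List.foldl_cons, pv_fst3, ih]

-- once the name is gone, the class-level fold does nothing
theorem pv_class_fold_absent (classes : List Int) (name : String) (p : String × Int) (day : String)
    (l : List String) (h : name ∉ l) :
    classes.foldl (fun l c => if p = (day, c) then l.erase name else l) l = l := by
  induction classes with
  | nil => rfl
  | cons c t ih =>
    simp only [List.foldl_cons]
    by_cases hc : p = (day, c)
    · rw [if_pos hc, List.erase_of_not_mem h, ih]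
    · rw [if_neg hc, ih]

-- class-level fold: at most one erase fires (the accumulator has no duplicate names)
theorem pv_class_fold (classes : List Int) (name : String) (p : String × Int) (day : String)
    (l : List String) (hl : l.Nodup) :
    classes.foldl (fun l c => if p = (day, c) then l.erase name else l) l
      = if day = p.1 ∧ p.2 ∈ classes then l.erase name else l := by
  induction classes generalizing l with
  | nil => simp
  | cons c t ih =>
    simp only [List.foldl_cons]
    by_cases hc : p = (day, c)
    · have hnm : name ∉ l.erase name := fun h => ((List.Nodup.mem_erase_iff hl).1 h).1 rfl
      have hp1 : day = p.1 := by rw [hc]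
      have hp2 : p.2 ∈ c :: t := by rw [hc]; exact List.mem_cons_self
      rw [if_pos hc, pv_class_fold_absent t name p day (l.erase name) hnm, if_pos ⟨hp1, hp2⟩]
    · rw [if_neg hc, ih l hl]
      by_cases hd : day = p.1
      · have hne : p.2 ≠ c := fun h => hc (Prod.ext hd.symm h)
        simp [hd, List.mem_cons, hne]
      · simp [hd]

-- schedule-level fold: the nested class folds amount to one erase iff the student is busy at p
theorem pv_sched_fold (sched : List (String × List Int)) (name : String) (p : String × Int)
    (l : List String) (hl : l.Nodup) (hs : (sched.map Prod.fst).Nodup) :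
    sched.foldl (fun l de => de.2.foldl (fun l c => if p = (de.1, c) then l.erase name else l) l) l
      = if p.1 ∈ sched.map Prod.fst ∧ p.2 ∈ (List.lookup p.1 sched).getD [] then l.erase name else l := by
  induction sched generalizing l with
  | nil => simp
  | cons de t ih =>
    obtain ⟨d1, d2⟩ := de
    simp only [List.map_cons, List.nodup_cons] at hs
    obtain ⟨hde, ht⟩ := hs
    simp only [List.foldl_cons]
    rw [pv_class_fold d2 name p d1 l hl]
    by_cases hd : d1 = p.1 ∧ p.2 ∈ d2
    · rw [if_pos hd, ih (l.erase name) (hl.erase name) ht]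
      have hp1 : p.1 ∉ t.map Prod.fst := hd.1 ▸ hde
      have hlk : List.lookup p.1 ((d1, d2) :: t) = some d2 := by
        simp [List.lookup, hd.1]
      simp [hp1, hd.2, hd.1]
    · rw [if_neg hd, ih l hl ht]
      by_cases h1 : d1 = p.1
      · have h2 : p.2 ∉ d2 := fun h => hd ⟨h1, h⟩
        have hp1 : p.1 ∉ t.map Prod.fst := h1 ▸ hde
        have hlk : List.lookup p.1 ((d1, d2) :: t) = some d2 := by
          simp [List.lookup, h1]
        simp [hp1, h2, h1]
      · have h1' : ¬ p.1 = d1 := fun h => h1 h.symm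
        have hb : (p.1 == d1) = false := by simp [h1']
        have hlk : List.lookup p.1 ((d1, d2) :: t) = List.lookup p.1 t := by
          simp only [List.lookup]; rw [hb]
        rw [hlk]
        by_cases hm : p.1 ∈ List.map Prod.fst t ∧ p.2 ∈ (List.lookup p.1 t).getD []
        · rw [if_pos hm, if_pos ⟨List.mem_cons_of_mem _ hm.1, hm.2⟩]
        · rw [if_neg hm, if_neg (fun hc => hm ⟨(List.mem_cons.1 hc.1).resolve_left h1', hc.2⟩)]

-- student-level fold (B's whole pass), with an already-settled prefix front
theorem pv_students_fold (sts : List (String × List (String × List Int))) (p : String × Int)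
    (front : List String)
    (hn : (front ++ sts.map Prod.fst).Nodup)
    (hs : ∀ st ∈ sts, (st.2.map Prod.fst).Nodup) :
    sts.foldl (fun l st =>
        st.2.foldl (fun l de =>
          de.2.foldl (fun l c => if p = (de.1, c) then l.erase st.1 else l) l) l)
      (front ++ sts.map Prod.fst)
      = front ++ (sts.filter (fun st => ! pvBusy st p)).map Prod.fst := by
  induction sts generalizing front with
  | nil => simp
  | cons st t ih =>
    have hnotfront : st.1 ∉ front := by
      intro h
      exact (List.disjoint_of_nodup_append hn) h (List.mem_cons_self)
    have hsub : List.Sublist (front ++ t.map Prod.fst) (front ++ st.1 :: t.map Prod.fst) :=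
      List.Sublist.append_left (List.sublist_cons_self _ _) front
    simp only [List.map_cons, List.foldl_cons]
    rw [pv_sched_fold st.2 st.1 p (front ++ st.1 :: t.map Prod.fst) hn
      (hs st List.mem_cons_self)]
    by_cases hb : pvBusy st p = true
    · have hcond : p.1 ∈ st.2.map Prod.fst ∧ p.2 ∈ (List.lookup p.1 st.2).getD [] := by
        simpa [pvBusy] using hb
      rw [if_pos hcond, List.erase_append_right _ hnotfront, List.erase_cons_head,
        ih front (List.Nodup.sublist hsub hn) (fun s hsmem => hs s (List.mem_cons_of_mem _ hsmem))]
      have : (List.filter (fun st => ! pvBusy st p) (st :: t)) =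
          List.filter (fun st => ! pvBusy st p) t := by
        rw [List.filter_cons_of_neg (by simpa using hb)]
      rw [this]
    · have hcond : ¬ (p.1 ∈ st.2.map Prod.fst ∧ p.2 ∈ (List.lookup p.1 st.2).getD []) := by
        simpa [pvBusy] using hb
      have hbf : pvBusy st p = false := by simpa using hb
      rw [if_neg hcond, List.append_cons front st.1 (t.map Prod.fst),
        ih (front ++ [st.1]) (by rw [← List.append_cons]; exact hn)
          (fun s hsmem => hs s (List.mem_cons_of_mem _ hsmem))]
      rw [List.filter_cons_of_pos (by simp [hbf]), List.map_cons, List.append_assoc,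
        List.singleton_append]

-- A's two-branch append loop is the filter of the non-busy students
theorem pv_A_fold (sts : List (String × List (String × List Int))) (p : String × Int)
    (acc : List String) :
    sts.foldl (fun acc st =>
        if ((st.2.map Prod.fst).contains p.1) = false then acc ++ [st.1]
        else if (((List.lookup p.1 st.2).getD []).contains p.2) = false then acc ++ [st.1]
        else acc) acc
      = acc ++ (sts.filter (fun st => ! pvBusy st p)).map Prod.fst := by
  induction sts generalizing acc with
  | nil => simp
  | cons st t ih =>
    simp only [List.foldl_cons]
    by_cases h1 : p.1 ∈ st.2.map Prod.fst
    · by_cases h2 : p.2 ∈ (List.lookup p.1 st.2).getD []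
      · have hb : pvBusy st p = true := by simp [pvBusy, h1, h2]
        rw [List.contains_eq_mem, List.contains_eq_mem]
        simp only [h1, h2, decide_true, Bool.true_eq_false, if_false]
        rw [ih acc, List.filter_cons_of_neg (by simp [hb])]
      · have hb : pvBusy st p = false := by simp [pvBusy, h2]
        rw [List.contains_eq_mem, List.contains_eq_mem]
        simp only [h1, h2, decide_true, decide_false, Bool.true_eq_false, if_false, if_true]
        rw [ih (acc ++ [st.1]), List.filter_cons_of_pos (by simp [hb]), List.map_cons,
          List.append_assoc, List.singleton_append]
    · have hb : pvBusy st p = false := by simp [pvBusy, h1]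
      rw [List.contains_eq_mem]
      simp only [h1, decide_false, if_true]
      rw [ih (acc ++ [st.1]), List.filter_cons_of_pos (by simp [hb]), List.map_cons,
        List.append_assoc, List.singleton_append]

-- ===== VERDICT (by name: the statement is the Claim_ definition above) =====
theorem find_free_students_spec : Claim_equal_find_free_students := by
  intro students weekdays max_class _ hpre
  unfold Spec_find_free_students
  obtain ⟨hnames, hscheds⟩ := hpre
  unfold find_free_students find_free_students_alt
  simp only [pv_stepC_eq, pv_foldl_map, List.map_map]
  refine List.map_congr_left (fun p _ => ?_)
  simp only [Function.comp_apply, pv_B_fold]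
  refine Prod.ext rfl (Prod.ext rfl ?_)
  rw [pv_A_fold students p []]
  have hB := pv_students_fold students p [] (by simpa using hnames) hscheds
  simp only [List.nil_append] at hB ⊢
  exact hB.symm
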